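-- pv_equiv track=rewrite | github.com/xlamorlette/challenges | coderpad/Can_you_beat_me_at_poker.py | shuffle_cards_pile
-- ===== SOURCE A (Python) =====
-- from collections import deque
--
-- def shuffle_cards_pile(initial_pile: list[str]) -> list[str]:
--     result_queue = deque()
--     add_on_top = True
--     for card in initial_pile[::-1]:
--         if add_on_top:
--             result_queue.append(card)
--         else:
--             result_queue.appendleft(card)
--         add_on_top = not add_on_top
--     return list(result_queue)
-- ===== SOURCE B (Python) =====
-- def shuffle_cards_pile(initial_pile: list[str]) -> list[str]:
--     # Reverse once, then split by parity: even positions of the reversed pile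
--     # end up at the back in order, odd positions end up at the front reversed.
--     r = initial_pile[::-1]
--     return r[1::2][::-1] + r[0::2]
-- ===== Notes on version B (the rewrite author's own statement) =====
-- stated objective: simpler
-- what changed: Replaces the deque with alternating append/appendleft and a toggle flag by a single reverse plus two parity slices concatenated (front = r[1::2] reversed, back = r[0::2]).
import Mathlib
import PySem

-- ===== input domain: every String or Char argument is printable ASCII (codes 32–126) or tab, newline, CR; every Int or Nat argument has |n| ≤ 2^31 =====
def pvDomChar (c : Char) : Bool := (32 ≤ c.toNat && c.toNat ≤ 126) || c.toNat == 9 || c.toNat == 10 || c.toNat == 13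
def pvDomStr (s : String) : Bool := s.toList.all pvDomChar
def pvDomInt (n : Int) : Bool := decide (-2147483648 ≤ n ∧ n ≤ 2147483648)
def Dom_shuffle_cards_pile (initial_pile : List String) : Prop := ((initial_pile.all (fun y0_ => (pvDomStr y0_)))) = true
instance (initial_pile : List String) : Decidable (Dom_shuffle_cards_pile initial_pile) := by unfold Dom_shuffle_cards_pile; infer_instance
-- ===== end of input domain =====

-- B replaces A's deque-with-toggle loop by one reverse and two parity slices; objective: simpler.

-- ===== PORT A =====
-- The deque loop: `result_queue.append(card)` is q ++ [card], `result_queue.appendleft(card)`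
-- is card :: q; the toggle flag `add_on_top` is the Bool.
def shuffleLoopA : List String → List String → Bool → List String
  | [], q, _ => q
  | c :: cs, q, add_on_top =>
      shuffleLoopA cs (if add_on_top then q ++ [c] else c :: q) (!add_on_top)

-- `initial_pile[::-1]` is List.reverse (PySem.List.slice?_none_none_neg_one).
def shuffle_cards_pile (initial_pile : List String) : List String :=
  shuffleLoopA initial_pile.reverse [] true

-- ===== PORT B =====
-- Hand port of the step-2 slices (exact on every list: start 0 resp. 1, step 2):
-- pvEvens r = r[0::2], pvOdds r = r[1::2]; `[::-1]` is List.reverse.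
def pvEvens : List String → List String
  | [] => []
  | [x] => [x]
  | x :: _ :: xs => x :: pvEvens xs

def pvOdds : List String → List String
  | [] => []
  | _ :: xs => pvEvens xs

def shuffle_cards_pile_alt (initial_pile : List String) : List String :=
  let r := initial_pile.reverse
  (pvOdds r).reverse ++ pvEvens r

-- ===== PRECONDITION & SPEC =====
def Spec_shuffle_cards_pile (initial_pile : List String) (out : List String) : Prop := out = shuffle_cards_pile_alt initial_pile
instance (initial_pile : List String) (out : List String) : Decidable (Spec_shuffle_cards_pile initial_pile out) := by unfold Spec_shuffle_cards_pile; infer_instance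

-- ===== CLAIM (what is proved, stated in full; the proofs are below) =====
def Claim_equal_shuffle_cards_pile : Prop := ∀ (initial_pile : List String), Dom_shuffle_cards_pile initial_pile → Spec_shuffle_cards_pile initial_pile (shuffle_cards_pile initial_pile)

-- ===== LEMMAS AND PROOFS =====

theorem pvEvens_cons (c : String) (cs : List String) :
    pvEvens (c :: cs) = c :: pvOdds cs := by
  cases cs <;> rfl

theorem shuffleLoopA_eq (l : List String) :
    ∀ (q : List String) (b : Bool),
      shuffleLoopA l q b =
        (if b then pvOdds l else pvEvens l).reverse ++ q ++
          (if b then pvEvens l else pvOdds l) := by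
  induction l with
  | nil => intro q b; cases b <;> simp [shuffleLoopA, pvEvens, pvOdds]
  | cons c cs ih =>
      intro q b
      cases b <;>
        simp [shuffleLoopA, ih, pvEvens_cons, pvOdds, List.append_assoc]

-- ===== VERDICT (by name: the statement is the Claim_ definition above) =====
theorem shuffle_cards_pile_spec : Claim_equal_shuffle_cards_pile := by
  intro initial_pile _
  unfold Spec_shuffle_cards_pile shuffle_cards_pile shuffle_cards_pile_alt
  rw [shuffleLoopA_eq]
  simp
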